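-- pv_equiv track=rewrite | github.com/ChineseResearcher/l33tc0d3-dump | binary_search/Q2560 House Robber IV.py | canRob
-- ===== SOURCE A (Python) =====
-- def canRob(nums, target, k):
--     # given a targeted miniMax (minimum capability), test if
--     # we could form a group with at least k members with max(group) being the target
--
--     # init. the index of last robbed house to -2 so that it is not a neighbour of index 0
--     lastRobbed = -2
--
--     cnt = 0
--     # count number of houses robbed s.t. no consecutive houses are robbed
--     for i in range(len(nums)):
--         if nums[i] <= target and i > lastRobbed + 1:
--             cnt += 1
--             lastRobbed = i
--
--     return True if cnt >= k else False
-- ===== SOURCE B (Python) =====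
-- def canRob(nums, target, k):
--     # House Robber DP over two states: best count with current house taken / not taken.
--     # take = -1 marks "taken" state impossible (counts are never negative).
--     take, skip = -1, 0
--     for x in nums:
--         if x <= target:
--             take, skip = skip + 1, max(take, skip)
--         else:
--             take, skip = -1, max(take, skip)
--     return max(take, skip) >= k
-- ===== Notes on version B (the rewrite author's own statement) =====
-- stated objective: alternative
-- what changed: Replaces the greedy scan tracking the last robbed index with the classic House Robber two-state DP (best count with the current house taken vs not taken), proved to compute the same maximum.
import Mathlib
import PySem

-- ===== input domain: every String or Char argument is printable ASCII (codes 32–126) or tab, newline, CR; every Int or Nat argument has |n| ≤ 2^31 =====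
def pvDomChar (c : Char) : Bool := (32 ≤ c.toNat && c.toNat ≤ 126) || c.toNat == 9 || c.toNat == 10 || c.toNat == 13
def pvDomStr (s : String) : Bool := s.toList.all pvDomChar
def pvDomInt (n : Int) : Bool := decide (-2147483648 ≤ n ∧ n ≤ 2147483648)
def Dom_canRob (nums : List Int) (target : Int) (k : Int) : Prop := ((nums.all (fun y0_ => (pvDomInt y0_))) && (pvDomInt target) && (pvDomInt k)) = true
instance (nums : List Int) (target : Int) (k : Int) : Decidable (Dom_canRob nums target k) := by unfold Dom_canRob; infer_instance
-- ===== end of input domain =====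

-- B replaces A's greedy scan (last-robbed index sentinel) with the classic two-state
-- House Robber DP (best count taken / not taken); same cost, different algorithm.

-- ===== PORT A =====
-- for i in range(len(nums)): if nums[i] <= target and i > lastRobbed + 1: cnt += 1; lastRobbed = i
-- state = (lastRobbed, cnt); nums[i] is always in range here, pyGetD is exact
def canRob (nums : List Int) (target : Int) (k : Int) : Bool :=
  decide (((PySem.List.pyRange 0 (nums.length : Int) 1).foldl
      (fun (st : Int × Int) (i : Int) =>
        if PySem.List.pyGetD nums i 0 ≤ target ∧ i > st.1 + 1 then (i, st.2 + 1) else st)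
      (-2, 0)).2 ≥ k)

-- ===== PORT B =====
-- state = (take, skip); take = -1 marks the "taken" state impossible
def canRob_alt (nums : List Int) (target : Int) (k : Int) : Bool :=
  let st := nums.foldl
      (fun (ts : Int × Int) (x : Int) =>
        if x ≤ target then (ts.2 + 1, max ts.1 ts.2) else (-1, max ts.1 ts.2))
      (-1, 0)
  decide (max st.1 st.2 ≥ k)

-- ===== PRECONDITION & SPEC =====
def Spec_canRob (nums : List Int) (target : Int) (k : Int) (out : Bool) : Prop := out = canRob_alt nums target k
instance (nums : List Int) (target : Int) (k : Int) (out : Bool) : Decidable (Spec_canRob nums target k out) := by unfold Spec_canRob; infer_instance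

-- ===== CLAIM (what is proved, stated in full; the proofs are below) =====
def Claim_equal_canRob : Prop := ∀ (nums : List Int) (target : Int) (k : Int), Dom_canRob nums target k → Spec_canRob nums target k (canRob nums target k)

-- ===== LEMMAS AND PROOFS =====

-- flag-based greedy: p = "previous house was robbed"; returns the final count
def pvGreedy (target : Int) : List Int → Bool → Int → Int
  | [], _, c => c
  | x :: xs, p, c =>
      if x ≤ target ∧ p = false then pvGreedy target xs true (c + 1)
      else pvGreedy target xs false c

-- A's indexed fold computes pvGreedy on the remaining suffix
theorem pvA_eq_greedy (nums : List Int) (target : Int) :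
    ∀ (l : List Int) (a last cnt : Int), 0 ≤ a → nums.drop a.toNat = l → last ≤ a - 1 →
    ((PySem.List.pyRange a (nums.length : Int) 1).foldl
      (fun (st : Int × Int) (i : Int) =>
        if PySem.List.pyGetD nums i 0 ≤ target ∧ i > st.1 + 1 then (i, st.2 + 1) else st)
      (last, cnt)).2
    = pvGreedy target l (decide (last = a - 1)) cnt := by
  intro l
  induction l with
  | nil =>
      intro a last cnt ha hdrop _
      have hlen : nums.length ≤ a.toNat := List.drop_eq_nil_iff.mp hdrop
      rw [PySem.List.pyRange_one_eq_nil (by omega)]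
      simp [pvGreedy]
  | cons x xs ih =>
      intro a last cnt ha hdrop hlast
      have hlt : a.toNat < nums.length := by
        by_contra h
        rw [List.drop_eq_nil_iff.mpr (by omega)] at hdrop
        simp at hdrop
      have haInt : a < (nums.length : Int) := by omega
      have hx : nums[a.toNat] = x := by
        have h0 : (nums.drop a.toNat)[0]'(by rw [hdrop]; simp) = x := by
          simp [hdrop]
        rw [List.getElem_drop] at h0
        simpa using h0
      have hget : PySem.List.pyGetD nums a 0 = x := by
        rw [PySem.List.pyGetD_eq_getElem nums 0 ha haInt, hx]
      rw [PySem.List.pyRange_one_cons haInt]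
      simp only [List.foldl_cons, hget]
      have hdrop' : nums.drop (a + 1).toNat = xs := by
        have h1 : (a + 1).toNat = a.toNat + 1 := by omega
        rw [h1, ← List.drop_drop, hdrop]
        rfl
      by_cases he : x ≤ target
      · by_cases hp : last = a - 1
        · -- previous house just robbed: skip
          rw [if_neg (by rintro ⟨_, h2⟩; omega)]
          rw [ih (a + 1) last cnt (by omega) hdrop' (by omega)]
          have h1 : (decide (last = a - 1)) = true := by simp [hp]
          have h2 : (decide (last = a + 1 - 1)) = false := by simp; omega
          rw [h1, h2]
          simp only [pvGreedy]
          rw [if_neg (by rintro ⟨_, h⟩; exact Bool.noConfusion h)]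
        · -- rob house a
          rw [if_pos ⟨he, by omega⟩]
          rw [ih (a + 1) a (cnt + 1) (by omega) hdrop' (by omega)]
          have h1 : (decide (last = a - 1)) = false := by simp [hp]
          have h2 : (decide (a = a + 1 - 1)) = true := by simp
          rw [h1, h2]
          simp only [pvGreedy]
          rw [if_pos ⟨he, by trivial⟩]
      · -- house too expensive: skip
        rw [if_neg (by rintro ⟨h1, _⟩; exact he h1)]
        rw [ih (a + 1) last cnt (by omega) hdrop' (by omega)]
        have h2 : (decide (last = a + 1 - 1)) = false := by simp; omega
        rw [h2]
        simp only [pvGreedy]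
        rw [if_neg (by rintro ⟨h1, _⟩; exact he h1)]

-- B's DP fold computes the same count as the greedy, under the state invariant
theorem pvB_eq_greedy (target : Int) :
    ∀ (l : List Int) (p : Bool) (c t s : Int), 0 ≤ c →
    (p = true → t = c ∧ s = c - 1) → (p = false → s = c ∧ t ≤ c) →
    max (l.foldl
        (fun (ts : Int × Int) (x : Int) =>
          if x ≤ target then (ts.2 + 1, max ts.1 ts.2) else (-1, max ts.1 ts.2))
        (t, s)).1
      (l.foldl
        (fun (ts : Int × Int) (x : Int) =>
          if x ≤ target then (ts.2 + 1, max ts.1 ts.2) else (-1, max ts.1 ts.2))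
        (t, s)).2 = pvGreedy target l p c := by
  intro l
  induction l with
  | nil =>
      intro p c t s hc hT hF
      cases p
      · obtain ⟨h1, h2⟩ := hF rfl
        simp only [List.foldl_nil, pvGreedy]
        omega
      · obtain ⟨h1, h2⟩ := hT rfl
        simp only [List.foldl_nil, pvGreedy]
        omega
  | cons x xs ih =>
      intro p c t s hc hT hF
      rw [List.foldl_cons]
      by_cases he : x ≤ target
      · rw [if_pos he]
        cases p
        · obtain ⟨h1, h2⟩ := hF rfl
          rw [ih true (c + 1) (s + 1) (max t s) (by omega)
            (fun _ => ⟨by omega, by omega⟩) (fun h => Bool.noConfusion h)]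
          simp only [pvGreedy]
          rw [if_pos ⟨he, by trivial⟩]
        · obtain ⟨h1, h2⟩ := hT rfl
          rw [ih false c (s + 1) (max t s) hc
            (fun h => Bool.noConfusion h) (fun _ => ⟨by omega, by omega⟩)]
          simp only [pvGreedy]
          rw [if_neg (by rintro ⟨_, h⟩; exact Bool.noConfusion h)]
      · rw [if_neg he]
        have hmax : max t s = c ∧ (-1 : Int) ≤ c := by
          cases p
          · obtain ⟨h1, h2⟩ := hF rfl; constructor <;> omega
          · obtain ⟨h1, h2⟩ := hT rfl; constructor <;> omega
        rw [ih false c (-1) (max t s) hc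
          (fun h => Bool.noConfusion h) (fun _ => ⟨hmax.1, hmax.2⟩)]
        simp only [pvGreedy]
        rw [if_neg (by rintro ⟨h1, _⟩; exact he h1)]

-- ===== VERDICT (by name: the statement is the Claim_ definition above) =====
theorem canRob_spec : Claim_equal_canRob := by
  intro nums target k _
  simp only [Spec_canRob, canRob, canRob_alt]
  rw [pvA_eq_greedy nums target nums 0 (-2) 0 le_rfl (by simp) (by omega)]
  rw [pvB_eq_greedy target nums false 0 (-1) 0 (by omega) (fun h => Bool.noConfusion h) (fun _ => by omega)]
  simp
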